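-- pv_equiv track=rewrite | github.com/STARSsoft/Python-GB-course | homework03/task03.py | find_comb
-- ===== SOURCE A (Python) =====
-- def find_comb(items, max_w):
--     sorted_items = sorted(items.items(), key=lambda x: x[1], reverse=True)
--
--     def find_com_rec(cur_w, cur_comb, rem_items):
--         if cur_w <= max_w:
--             result.append(cur_comb)
--
--         for i in range(len(rem_items)):
--             new_comb = cur_comb + [rem_items[i]]
--             new_w = cur_w + rem_items[i][1]
--             new_rem = rem_items[i + 1:]
--             find_com_rec(new_w, new_comb, new_rem)
--
--     result = []
--     find_com_rec(0, [], sorted_items)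
--
--     # удаляем подмножества
--     final_result = []
--     to_remove = set()
--     for i in range(len(result)):
--         is_subset = False
--         for j in range(len(result)):
--             if i == j:
--                 continue
--             if set(result[i]).issubset(set(result[j])):
--                 is_subset = True
--                 to_remove.add(i)
--                 break
--         if not is_subset:
--             final_result.append(result[i])
--
--     # удаляем подмножества из исходного списка
--     final_result = [item for i, item in enumerate(result) if i not in to_remove]
--     return final_result
-- ===== SOURCE B (Python) =====
-- def find_comb(items, max_w):
--     its = sorted(items.items(), key=lambda x: x[1], reverse=True)
--
--     def subsets(xs):
--         # non-empty subsets of xs, paired with their weight, in index-lexicographic order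
--         if not xs:
--             return []
--         rest = subsets(xs[1:])
--         return [([xs[0]] + s, xs[0][1] + w) for s, w in [([], 0)] + rest] + rest
--
--     feas = [(s, w) for s, w in [([], 0)] + subsets(its) if w <= max_w]
--     # keep S iff no single remaining item still fits (local maximality)
--     return [s for s, w in feas if all(x in s or w + x[1] > max_w for x in its)]
-- ===== Notes on version B (the rewrite author's own statement) =====
-- stated objective: faster
-- what changed: Subset enumeration becomes a structural recursion producing (subset, weight) pairs, and the O(|result|^2) pairwise issubset dedup is replaced by a per-subset local maximality test (no single remaining item still fits), which is equivalent over integer weights.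
import Mathlib
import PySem

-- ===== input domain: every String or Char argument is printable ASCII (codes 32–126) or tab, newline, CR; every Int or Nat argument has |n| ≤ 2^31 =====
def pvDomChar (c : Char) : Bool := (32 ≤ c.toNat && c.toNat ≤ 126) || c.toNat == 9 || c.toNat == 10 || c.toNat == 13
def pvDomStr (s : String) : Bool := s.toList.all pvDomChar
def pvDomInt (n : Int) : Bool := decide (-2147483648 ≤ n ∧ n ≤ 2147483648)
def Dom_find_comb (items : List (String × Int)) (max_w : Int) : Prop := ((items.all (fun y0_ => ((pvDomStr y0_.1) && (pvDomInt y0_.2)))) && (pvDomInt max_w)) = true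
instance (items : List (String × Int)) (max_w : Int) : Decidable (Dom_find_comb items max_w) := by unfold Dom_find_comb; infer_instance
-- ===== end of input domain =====

-- B replaces A's O(|result|^2) pairwise issubset dedup by a per-subset local maximality
-- test; equal return values on all inputs (the argument dict is not mutated by either).

-- ===== PORT A =====
mutual
  -- find_com_rec(cur_w, cur_comb, rem_items): the appended results, in append order
  def pvGoA (max_w cur_w : Int) (cur_comb rem : List (String × Int)) :
      List (List (String × Int)) :=
    (if cur_w ≤ max_w then [cur_comb] else []) ++ pvLoopA max_w cur_w cur_comb rem
  termination_by (rem.length, 1)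
  -- the 'for i in range(len(rem_items))' loop (recursing on rem_items[i+1:])
  def pvLoopA (max_w cur_w : Int) (cur_comb rem : List (String × Int)) :
      List (List (String × Int)) :=
    match rem with
    | [] => []
    | x :: rs => pvGoA max_w (cur_w + x.2) (cur_comb ++ [x]) rs ++ pvLoopA max_w cur_w cur_comb rs
  termination_by (rem.length, 0)
  decreasing_by
  all_goals simp [Prod.lex_iff]
end

def find_comb (items : List (String × Int)) (max_w : Int) : List (List (String × Int)) :=
  let sorted_items := PySem.List.sorted (PySem.Dict.ofList items).items (fun x => x.2) true
  let result := pvGoA max_w 0 [] sorted_items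
  -- first dedup loop: to_remove = {i | ∃ j ≠ i, set(result[i]) ⊆ set(result[j])}
  let toRemove := (List.range result.length).filter (fun i =>
    (List.range result.length).any (fun j =>
      decide (j ≠ i) && (result.getD i []).all (fun e => (result.getD j []).contains e)))
  -- final_result = [item for i, item in enumerate(result) if i not in to_remove]
  result.zipIdx.filterMap (fun p => if toRemove.contains p.2 then none else some p.1)

-- ===== PORT B =====
-- subsets(xs): non-empty subsets with their weights, index-lexicographic order
def pvSubsB (xs : List (String × Int)) : List (List (String × Int) × Int) :=
  match xs with
  | [] => []
  | x :: rest =>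
    ((([], 0) :: pvSubsB rest).map (fun sw => (x :: sw.1, x.2 + sw.2))) ++ pvSubsB rest

def find_comb_alt (items : List (String × Int)) (max_w : Int) : List (List (String × Int)) :=
  let its := PySem.List.sorted (PySem.Dict.ofList items).items (fun x => x.2) true
  let feas := (([], 0) :: pvSubsB its).filter (fun sw => sw.2 ≤ max_w)
  (feas.filter (fun sw =>
    its.all (fun x => sw.1.contains x || decide (max_w < sw.2 + x.2)))).map (·.1)

-- ===== PRECONDITION & SPEC =====
def Spec_find_comb (items : List (String × Int)) (max_w : Int) (out : List (List (String × Int))) : Prop := out = find_comb_alt items max_w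
instance (items : List (String × Int)) (max_w : Int) (out : List (List (String × Int))) : Decidable (Spec_find_comb items max_w out) := by unfold Spec_find_comb; infer_instance

-- ===== CLAIM (what is proved, stated in full; the proofs are below) =====
def Claim_equal_find_comb : Prop := ∀ (items : List (String × Int)) (max_w : Int), Dom_find_comb items max_w → Spec_find_comb items max_w (find_comb items max_w)

-- ===== LEMMAS AND PROOFS =====

-- weight of a subset
def pvW (s : List (String × Int)) : Int := (s.map (·.2)).sum

-- Step 1: A's DFS result is the feasibility filter of B's enumeration.
theorem pvLoopA_eq (max_w : Int) : ∀ (rem : List (String × Int)) (cur_w : Int) (cur_comb : List (String × Int)),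
    pvLoopA max_w cur_w cur_comb rem =
      (pvSubsB rem).filterMap (fun sw => if cur_w + sw.2 ≤ max_w then some (cur_comb ++ sw.1) else none) := by
  intro rem
  induction rem with
  | nil => intro cw cc; simp [pvLoopA, pvSubsB]
  | cons x rs ih =>
    intro cw cc
    rw [pvLoopA, pvGoA, ih, ih]
    simp only [pvSubsB, List.filterMap_append, List.filterMap_map, List.filterMap_cons,
      Function.comp_def]
    have hfun : ∀ sw : List (String × Int) × Int,
        (if cw + (x.2 + sw.2) ≤ max_w then some (cc ++ (x :: sw.1)) else none) =
        (if cw + x.2 + sw.2 ≤ max_w then some ((cc ++ [x]) ++ sw.1) else none) := by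
      intro sw
      have h1 : cw + (x.2 + sw.2) ≤ max_w ↔ cw + x.2 + sw.2 ≤ max_w := by omega
      have h2 : cc ++ (x :: sw.1) = (cc ++ [x]) ++ sw.1 := by simp
      rw [h2]
      by_cases h : cw + x.2 + sw.2 ≤ max_w <;> simp [h, h1.mpr, h1]
    simp only [hfun]
    by_cases h : cw + x.2 ≤ max_w <;>
      simp [h, List.append_assoc]

theorem pvGoA_eq (max_w : Int) (rem : List (String × Int)) (cur_w : Int) (cur_comb : List (String × Int)) :
    pvGoA max_w cur_w cur_comb rem =
      ((([], 0) :: pvSubsB rem)).filterMap (fun sw => if cur_w + sw.2 ≤ max_w then some (cur_comb ++ sw.1) else none) := by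
  rw [pvGoA, pvLoopA_eq]
  by_cases h : cur_w ≤ max_w <;> simp [h]

-- filterMap with if-some is map-fst of filter
theorem pvFilterMap_if (l : List (List (String × Int) × Int)) (p : List (String × Int) × Int → Bool) :
    l.filterMap (fun sw => if p sw then some sw.1 else none) = (l.filter p).map (·.1) := by
  induction l with
  | nil => rfl
  | cons a t ih => by_cases h : p a <;> simp [h, ih]

-- Step 2: the enumeration lists exactly the sublists, each with its weight, without repetition.
theorem pvSubsB_fst_ne_nil : ∀ (xs : List (String × Int)) (sw : List (String × Int) × Int), sw ∈ pvSubsB xs → sw.1 ≠ [] := by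
  intro xs
  induction xs with
  | nil => simp [pvSubsB]
  | cons x rs ih =>
    intro sw hsw
    simp only [pvSubsB, List.mem_append, List.mem_map, List.mem_cons] at hsw
    rcases hsw with ⟨sw', _, rfl⟩ | h
    · simp
    · exact ih sw h

theorem pvSubsB_sound : ∀ (xs : List (String × Int)) (sw : List (String × Int) × Int),
    sw ∈ ([], 0) :: pvSubsB xs → sw.1.Sublist xs ∧ sw.2 = pvW sw.1 := by
  intro xs
  induction xs with
  | nil => simp [pvSubsB, pvW]
  | cons x rs ih =>
    intro sw hsw
    simp only [List.mem_cons, pvSubsB, List.mem_append, List.mem_map] at hsw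
    rcases hsw with rfl | ⟨sw', hsw', rfl⟩ | h
    · simp [pvW]
    · obtain ⟨h1, h2⟩ := ih sw' (List.mem_cons.mpr hsw')
      exact ⟨List.Sublist.cons₂ x h1, by simp [pvW, h2]⟩
    · obtain ⟨h1, h2⟩ := ih sw (List.mem_cons_of_mem _ h)
      exact ⟨h1.cons x, h2⟩

theorem pvSubsB_complete : ∀ (xs s : List (String × Int)), s.Sublist xs → (s, pvW s) ∈ ([], 0) :: pvSubsB xs := by
  intro xs
  induction xs with
  | nil => intro s hs; simp_all [pvW]
  | cons x rs ih =>
    intro s hs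
    rcases List.sublist_cons_iff.mp hs with h | ⟨t, rfl, ht⟩
    · rcases List.mem_cons.mp (ih s h) with h' | h'
      · exact List.mem_cons.mpr (Or.inl h')
      · exact List.mem_cons_of_mem _ (by simp only [pvSubsB, List.mem_append]; exact Or.inr h')
    · refine List.mem_cons_of_mem _ ?_
      simp only [pvSubsB, List.mem_append, List.mem_map]
      exact Or.inl ⟨(t, pvW t), ih t ht, by simp [pvW]⟩

theorem pvSubsB_nodup : ∀ (xs : List (String × Int)), xs.Nodup → ((([], 0) :: pvSubsB xs).map (·.1)).Nodup := by
  intro xs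
  induction xs with
  | nil => simp [pvSubsB]
  | cons x rs ih =>
    intro hnd
    rcases List.nodup_cons.mp hnd with ⟨hx, hrs⟩
    have ihn0 := ih hrs
    have ihn := ihn0
    simp only [List.map_cons] at ihn
    have hT : ∀ b ∈ (pvSubsB rs).map (·.1), x ∉ b := by
      intro b hb
      simp only [List.mem_map] at hb
      obtain ⟨sw, hsw, rfl⟩ := hb
      exact fun hmem => hx ((pvSubsB_sound rs sw (List.mem_cons_of_mem _ hsw)).1.subset hmem)
    have hEq : ((([], 0) :: pvSubsB (x :: rs)).map (·.1)) =
        [] :: ((((([], 0) :: pvSubsB rs).map (·.1)).map (fun s => x :: s)) ++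
          (pvSubsB rs).map (·.1)) := by
      simp [pvSubsB, List.map_map, Function.comp_def]
    rw [hEq, List.nodup_cons]
    constructor
    · simp only [List.mem_append, List.mem_map, not_or]
      constructor
      · rintro ⟨s, _, h⟩
        exact List.cons_ne_nil _ _ h
      · rintro ⟨sw, hsw, h⟩
        exact pvSubsB_fst_ne_nil rs sw hsw h
    · rw [List.nodup_append]
      refine ⟨ihn0.map (fun a b h => by injection h), ihn.of_cons, ?_⟩
      intro a ha b hb hab
      subst hab
      simp only [List.mem_map] at ha
      obtain ⟨s, _, rfl⟩ := ha
      exact hT _ hb (by simp)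

-- Step 3 helpers: a sublist of a nodup list is its filter by membership, hence determined by its members.
theorem pvFilter_mem_eq (xs s : List (String × Int)) (hs : s.Sublist xs) (hnd : xs.Nodup) :
    xs.filter (fun a => decide (a ∈ s)) = s := by
  induction xs generalizing s with
  | nil => simp [List.sublist_nil.mp hs]
  | cons x xs' ih =>
    rcases List.nodup_cons.mp hnd with ⟨hx, hnd'⟩
    rcases List.sublist_cons_iff.mp hs with h | ⟨t, rfl, ht⟩
    · have hxs : x ∉ s := fun hmem => hx (h.subset hmem)
      simp only [List.filter_cons, decide_eq_true_eq, hxs]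
      simpa [hxs] using ih _ h hnd'
    · have hxxs : x ∉ xs' := hx
      simp only [List.filter_cons]
      rw [if_pos (by simp)]
      congr 1
      have : xs'.filter (fun a => decide (a ∈ x :: t)) = xs'.filter (fun a => decide (a ∈ t)) := by
        apply List.filter_congr
        intro a ha
        have : a ≠ x := fun h => hxxs (h ▸ ha)
        simp [this]
      rw [this]
      exact ih _ ht hnd'

theorem pvSublist_ext (xs s t : List (String × Int)) (hnd : xs.Nodup)
    (hs : s.Sublist xs) (ht : t.Sublist xs) (h : ∀ a, a ∈ s ↔ a ∈ t) : s = t := by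
  rw [← pvFilter_mem_eq xs s hs hnd, ← pvFilter_mem_eq xs t ht hnd]
  exact List.filter_congr (fun a _ => by simp [h a])

-- Step 3 (core): a feasible subset has a feasible strict superset iff one more item still fits.
theorem pvCore (max_w : Int) (its s : List (String × Int)) (hnd : its.Nodup)
    (hs : s.Sublist its) (hw : pvW s ≤ max_w) :
    (∃ t, t.Sublist its ∧ pvW t ≤ max_w ∧ t ≠ s ∧ ∀ e ∈ s, e ∈ t) ↔
      (∃ x ∈ its, x ∉ s ∧ pvW s + x.2 ≤ max_w) := by
  constructor
  · rintro ⟨t, htsub, htw, htne, hts⟩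
    have htnd : t.Nodup := htsub.nodup hnd
    -- split t into its elements in s (which form exactly s) and the extras
    have h1 : t.filter (fun a => decide (a ∈ s)) = s := by
      apply pvSublist_ext its _ s hnd (List.filter_sublist.trans htsub) hs
      intro a
      simp only [List.mem_filter, decide_eq_true_eq]
      exact ⟨fun h => h.2, fun h => ⟨hts a h, h⟩⟩
    have hperm : (t.filter (fun a => decide (a ∈ s)) ++
        t.filter (fun a => !decide (a ∈ s))).Perm t := List.filter_append_perm _ t
    have hsplit : pvW s + pvW (t.filter (fun a => !decide (a ∈ s))) = pvW t := by
      have := (hperm.map (·.2)).sum_eq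
      simpa [pvW, h1] using this
    have hne' : t.filter (fun a => !decide (a ∈ s)) ≠ [] := by
      intro h0
      apply htne
      apply pvSublist_ext its t s hnd htsub hs
      intro a
      refine ⟨fun hat => ?_, fun has => hts a has⟩
      by_contra hns
      have : a ∈ t.filter (fun a => !decide (a ∈ s)) := by simp [hns, hat]
      simp [h0] at this
    by_cases hneg : ∃ x ∈ t.filter (fun a => !decide (a ∈ s)), x.2 ≤ 0
    · obtain ⟨x, hxe, hx2⟩ := hneg
      have hxt := List.mem_of_mem_filter hxe
      have hxns : x ∉ s := by simpa using (List.of_mem_filter hxe)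
      exact ⟨x, htsub.subset hxt, hxns, by omega⟩
    · push Not at hneg
      rcases hext : t.filter (fun a => !decide (a ∈ s)) with _ | ⟨x, rest⟩
      · exact absurd hext hne'
      · have hxe : x ∈ t.filter (fun a => !decide (a ∈ s)) := by rw [hext]; simp
        have hxt := List.mem_of_mem_filter hxe
        have hxns : x ∉ s := by simpa using (List.of_mem_filter hxe)
        have hrest : 0 ≤ pvW rest := by
          apply List.sum_nonneg
          intro w hw
          simp only [List.mem_map] at hw
          obtain ⟨y, hy, rfl⟩ := hw
          have : y ∈ t.filter (fun a => !decide (a ∈ s)) := by rw [hext]; simp [hy]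
          exact le_of_lt (hneg y this)
        have : pvW (t.filter (fun a => !decide (a ∈ s))) = x.2 + pvW rest := by
          rw [hext]; simp [pvW]
        exact ⟨x, htsub.subset hxt, hxns, by omega⟩
  · rintro ⟨x, hxits, hxns, hxw⟩
    refine ⟨its.filter (fun a => decide (a ∈ x :: s)), List.filter_sublist, ?_, ?_, ?_⟩
    · -- weight: the filter is a permutation of x :: s
      have hmem : ∀ a, a ∈ its.filter (fun a => decide (a ∈ x :: s)) ↔ a ∈ x :: s := by
        intro a
        simp only [List.mem_filter, decide_eq_true_eq, and_iff_right_iff_imp]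
        intro h
        rcases List.mem_cons.mp h with rfl | h'
        · exact hxits
        · exact hs.subset h'
      have hperm : (its.filter (fun a => decide (a ∈ x :: s))).Perm (x :: s) := by
        rw [List.perm_ext_iff_of_nodup ((List.filter_sublist).nodup hnd)
          (List.nodup_cons.mpr ⟨hxns, hs.nodup hnd⟩)]
        exact hmem
      have := (hperm.map (·.2)).sum_eq
      have hW : pvW (its.filter (fun a => decide (a ∈ x :: s))) = x.2 + pvW s := by
        simpa [pvW] using this
      omega
    · intro h
      have hx : x ∈ its.filter (fun a => decide (a ∈ x :: s)) := by
        simp [List.mem_filter, hxits]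
      rw [h] at hx
      exact hxns hx
    · intro e he
      simp [List.mem_filter, hs.subset he, he]

-- Step 4: the index bookkeeping of A's dedup is a filter over result (result has no duplicates).
theorem pvZipIdx_filterMap {α : Type} (R : List α) (q : Nat → Bool) (p' : α → Bool) :
    ∀ (n : Nat), (∀ (k : Nat) (h : k < R.length), q (n + k) = p' R[k]) →
    (R.zipIdx n).filterMap (fun p => if q p.2 then none else some p.1) = R.filter (fun a => !p' a) := by
  induction R with
  | nil => intro n _; simp
  | cons x xs ih =>
    intro n hq
    have h0 : q n = p' x := by simpa using hq 0 (by simp)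
    have hstep : ∀ (k : Nat) (h : k < xs.length), q (n + 1 + k) = p' xs[k] := by
      intro k h
      have := hq (k + 1) (by simpa using Nat.succ_lt_succ h)
      simpa [Nat.add_assoc, Nat.add_comm 1 k] using this
    simp only [List.zipIdx_cons, List.filterMap_cons, List.filter_cons, h0]
    rw [ih (n + 1) hstep]
    cases hp : p' x <;> simp

-- membership in A's DFS result = feasible sublist
theorem pvMemR (max_w : Int) (its : List (String × Int)) (t : List (String × Int)) :
    t ∈ (((([], 0) :: pvSubsB its).filter (fun sw => decide (sw.2 ≤ max_w))).map (·.1)) ↔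
      (t.Sublist its ∧ pvW t ≤ max_w) := by
  simp only [List.mem_map, List.mem_filter, decide_eq_true_eq]
  constructor
  · rintro ⟨sw, ⟨hmem, hle⟩, rfl⟩
    obtain ⟨h1, h2⟩ := pvSubsB_sound its sw hmem
    exact ⟨h1, h2 ▸ hle⟩
  · rintro ⟨hsub, hle⟩
    exact ⟨(t, pvW t), ⟨pvSubsB_complete its t hsub, hle⟩, rfl⟩

-- ===== VERDICT (by name: the statement is the Claim_ definition above) =====
theorem find_comb_spec : Claim_equal_find_comb := by
  unfold Claim_equal_find_comb Spec_find_comb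
  intro items max_w _
  unfold find_comb find_comb_alt
  dsimp only
  set its := PySem.List.sorted (PySem.Dict.ofList items).items (fun x => x.2) true with hits
  have hnd : its.Nodup := by
    have hk : ((PySem.Dict.ofList items).items.map (·.1)).Nodup := PySem.Dict.nodup_keys_ofList items
    have hitems : (PySem.Dict.ofList items).items.Nodup := hk.of_map
    exact (PySem.List.sorted_perm _ _ _).nodup_iff.mpr hitems
  have hR : pvGoA max_w 0 [] its =
      ((([], 0) :: pvSubsB its).filter (fun sw => decide (sw.2 ≤ max_w))).map (·.1) := by
    rw [pvGoA_eq]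
    have hfn : (fun (sw : List (String × Int) × Int) =>
        if 0 + sw.2 ≤ max_w then some ([] ++ sw.1) else none) =
        (fun sw => if decide (sw.2 ≤ max_w) = true then some sw.1 else none) := by
      funext sw; simp
    rw [hfn, pvFilterMap_if]
  rw [hR]
  set R := ((([], 0) :: pvSubsB its).filter (fun sw => decide (sw.2 ≤ max_w))).map (·.1) with hRdef
  have hRnd : R.Nodup := by
    rw [hRdef]
    exact ((List.filter_sublist (l := ([], 0) :: pvSubsB its)
      (p := fun sw => decide (sw.2 ≤ max_w))).map (·.1)).nodup (pvSubsB_nodup its hnd)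
  -- A's index-based dedup is a filter of R by 'has a strict feasible superset'
  rw [pvZipIdx_filterMap R _ (fun s => R.any (fun t => decide (t ≠ s) && s.all (fun e => t.contains e))) 0 ?hq]
  case hq =>
    intro k hk
    simp only [Nat.zero_add]
    rw [Bool.eq_iff_iff]
    simp only [List.contains_iff_mem, List.mem_filter, List.mem_range, List.any_eq_true,
      List.getD_eq_getElem _ _ hk, decide_eq_true_eq, Bool.and_eq_true]
    constructor
    · rintro ⟨-, j, hj, hjk, hsub⟩
      rw [List.getD_eq_getElem _ _ hj] at hsub
      exact ⟨R[j], List.getElem_mem hj, fun h => hjk ((hRnd.getElem_inj_iff).mp h), hsub⟩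
    · rintro ⟨t, hmem, hne, hsub⟩
      obtain ⟨j, hj, rfl⟩ := List.mem_iff_getElem.mp hmem
      refine ⟨hk, j, by simpa using hj, fun h => hne (by cases h; rfl), ?_⟩
      rw [List.getD_eq_getElem _ _ hj]
      exact hsub
  -- B's side: the pairwise test agrees with the local maximality test on every feasible subset
  rw [hRdef, List.filter_map]
  congr 1
  apply List.filter_congr
  intro sw hsw
  obtain ⟨hmem, hle'⟩ := List.mem_filter.mp hsw
  have hle : sw.2 ≤ max_w := by simpa using hle'
  obtain ⟨hsub, hw⟩ := pvSubsB_sound its sw hmem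
  have hcore := pvCore max_w its sw.1 hnd hsub (hw ▸ hle)
  have hL : ((((([], 0) :: pvSubsB its).filter (fun sw => decide (sw.2 ≤ max_w))).map (·.1)).any
      (fun t => decide (t ≠ sw.1) && sw.1.all (fun e => t.contains e))) = true ↔
      ∃ x ∈ its, x ∉ sw.1 ∧ pvW sw.1 + x.2 ≤ max_w := by
    rw [← hcore]
    simp only [List.any_eq_true, Bool.and_eq_true, decide_eq_true_eq, List.all_eq_true,
      List.contains_iff_mem]
    constructor
    · rintro ⟨t, htR, hne, hsubt⟩
      obtain ⟨h1, h2⟩ := (pvMemR max_w its t).mp htR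
      exact ⟨t, h1, h2, hne, hsubt⟩
    · rintro ⟨t, h1, h2, hne, hsubt⟩
      exact ⟨t, (pvMemR max_w its t).mpr ⟨h1, h2⟩, hne, hsubt⟩
  show (!_) = _
  apply Bool.eq_iff_iff.mpr
  rw [Bool.not_eq_true', Bool.eq_false_iff, Ne, hL, hw]
  simp only [List.all_eq_true, Bool.or_eq_true, List.contains_iff_mem, decide_eq_true_eq]
  constructor
  · intro h x hx
    by_cases hxs : x ∈ sw.1
    · exact Or.inl hxs
    · refine Or.inr ?_
      by_contra hlt
      push Not at hlt
      exact h ⟨x, hx, hxs, by omega⟩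
  · rintro h ⟨x, hx, hxs, hle2⟩
    rcases h x hx with h' | h'
    · exact hxs h'
    · omega
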